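-- pv_equiv track=rewrite | github.com/HRishabh95/CREDPASS | read_portal.py | process_prev_il
-- ===== SOURCE A (Python) =====
-- def process_prev_il(rows):
--     if type(rows['pre_il']) is str:
--         symp_il = []
--         sympsi = rows['pre_il'].split("..")
--         for symps in sympsi:
--             for symp in symps.split("."):
--                 if len(symp.split())<8 and len(symp)!=0:
--                     symp_il.append(f'''{rows['disease_name']} can be prevented by {symp}''')
--         #symp_il = ".".join(symp_il)
--         return symp_il
--     else:
--         return []
-- ===== SOURCE B (Python) =====
-- def process_prev_il(rows):
--     if type(rows['pre_il']) is not str: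
--         return []
--     out = []
--     cur = ""
--     for ch in rows['pre_il'] + ".":
--         if ch == ".":
--             if cur != "" and len(cur.split()) < 8:
--                 out.append(f"{rows['disease_name']} can be prevented by {cur}")
--             cur = ""
--         else:
--             cur += ch
--     return out
-- ===== Notes on version B (the rewrite author's own statement) =====
-- stated objective: alternative
-- what changed: The nested split-on-'..'-then-split-on-'.' double loop is replaced by a single character-by-character scan that accumulates the current '.'-delimited token in a buffer and flushes it through the nonempty/word-count filter, with no call to split for tokenisation at all.
import Mathlib
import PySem

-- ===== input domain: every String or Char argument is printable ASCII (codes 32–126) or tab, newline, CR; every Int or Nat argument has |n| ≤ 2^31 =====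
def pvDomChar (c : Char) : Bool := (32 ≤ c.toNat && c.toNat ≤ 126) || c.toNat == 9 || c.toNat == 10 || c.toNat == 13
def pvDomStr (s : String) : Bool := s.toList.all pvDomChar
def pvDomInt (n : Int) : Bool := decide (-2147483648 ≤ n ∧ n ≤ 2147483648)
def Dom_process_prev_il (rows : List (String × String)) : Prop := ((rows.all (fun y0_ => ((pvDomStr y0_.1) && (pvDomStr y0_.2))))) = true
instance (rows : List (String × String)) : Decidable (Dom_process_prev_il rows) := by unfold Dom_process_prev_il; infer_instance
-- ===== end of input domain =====

-- B replaces A's nested split("..")/split(".") loops by a single character-by-character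
-- scanner that builds each '.'-delimited token in an accumulator and flushes it through the
-- same filter (objective: alternative decomposition).


-- ===== PORT A =====
-- Under the type convention rows' values are strings, so A's `type(rows['pre_il']) is str`
-- guard is always true and its `else: return []` branch is unreachable.
def process_prev_il (rows : List (String × String)) : List String :=
  match PySem.Dict.get? (PySem.Dict.mk rows) "pre_il" with
  | none => []   -- Python raises KeyError here; excluded by Pre_
  | some pre =>
    let sympsi := (PySem.Str.split? pre "..").getD []
    sympsi.foldl (fun symp_il symps =>
      ((PySem.Str.split? symps ".").getD []).foldl (fun acc symp =>
        if (PySem.Str.split₀ symp).length < 8 && PySem.Str.len symp != 0 then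
          acc ++ [((PySem.Dict.get? (PySem.Dict.mk rows) "disease_name").getD "")
                    ++ " can be prevented by " ++ symp]
        else acc) symp_il) []

-- ===== PORT B =====
-- the `for ch in rows['pre_il'] + "."` loop of Source B: `cur` is the token being built,
-- `out` the result list; a '.' flushes `cur` through the filter.
def ppilScan (dn : String) : List Char → List Char → List String → List String
  | [], _cur, out => out
  | c :: rest, cur, out =>
    if c = '.' then
      ppilScan dn rest []
        (if cur ≠ [] ∧ (PySem.Chars.split₀ cur).length < 8 then
          out ++ [dn ++ " can be prevented by " ++ String.ofList cur]
        else out)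
    else ppilScan dn rest (cur ++ [c]) out

def process_prev_il_alt (rows : List (String × String)) : List String :=
  match PySem.Dict.get? (PySem.Dict.mk rows) "pre_il" with
  | none => []   -- Python raises KeyError here; excluded by Pre_
  | some pre =>
    ppilScan ((PySem.Dict.get? (PySem.Dict.mk rows) "disease_name").getD "")
      (pre.toList ++ ['.']) [] []

-- ===== PRECONDITION & SPEC =====
-- Pre_ excludes exactly the inputs on which both Pythons raise KeyError: rows without a
-- 'pre_il' key, and rows without a 'disease_name' key on which some token qualifies for
-- output (nonempty, fewer than 8 words), so that the f-string lookup is reached.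
def Pre_process_prev_il (rows : List (String × String)) : Prop :=
  (PySem.Dict.get? (PySem.Dict.mk rows) "pre_il").isSome = true ∧
  ((PySem.Dict.get? (PySem.Dict.mk rows) "disease_name").isSome = true ∨
    ∀ s ∈ (PySem.Str.split? ((PySem.Dict.get? (PySem.Dict.mk rows) "pre_il").getD "") ".").getD [],
      s = "" ∨ ¬ (PySem.Str.split₀ s).length < 8)
instance (rows : List (String × String)) : Decidable (Pre_process_prev_il rows) := by
  unfold Pre_process_prev_il; infer_instance
def pvWitness_process_prev_il : (List (String × String)) :=
  [("pre_il", "rest..exercise.a b c d e f g h."), ("disease_name", "flu")]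

def Spec_process_prev_il (rows : List (String × String)) (out : List String) : Prop := out = process_prev_il_alt rows
instance (rows : List (String × String)) (out : List String) : Decidable (Spec_process_prev_il rows out) := by unfold Spec_process_prev_il; infer_instance

-- ===== CLAIM (what is proved, stated in full; the proofs are below) =====
def Claim_equal_process_prev_il : Prop := ∀ (rows : List (String × String)), Dom_process_prev_il rows → Pre_process_prev_il rows → Spec_process_prev_il rows (process_prev_il rows)

-- ===== LEMMAS AND PROOFS =====

def sp1 : List Char → List (List Char)
  | [] => [[]]
  | c :: l => if c = '.' then [] :: sp1 l else (sp1 l).modifyHead (c :: ·)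

def sp2 : List Char → List (List Char)
  | [] => [[]]
  | [c] => [[c]]
  | c :: d :: m =>
    if c = '.' ∧ d = '.' then [] :: sp2 m
    else (sp2 (d :: m)).modifyHead (c :: ·)

lemma sp1_ne_nil (l : List Char) : sp1 l ≠ [] := by
  cases l with
  | nil => simp [sp1]
  | cons c l =>
    simp only [sp1]
    split
    · simp
    · rw [Ne, List.modifyHead_eq_nil_iff]
      exact sp1_ne_nil l

lemma sp2_ne_nil (l : List Char) : sp2 l ≠ [] := by
  match l with
  | [] => simp [sp2]
  | [c] => simp [sp2]
  | c :: d :: m =>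
    simp only [sp2]
    split
    · simp
    · rw [Ne, List.modifyHead_eq_nil_iff]
      exact sp2_ne_nil (d :: m)

lemma go1_eq : ∀ (fuel : Nat) (l cur : List Char) (acc : List (List Char)),
    l.length < fuel →
    PySem.Chars.splitOn.go ['.'] fuel l cur acc
      = acc.reverse ++ (sp1 l).modifyHead (cur.reverse ++ ·) := by
  intro fuel
  induction fuel with
  | zero => intro l cur acc h; omega
  | succ n ih =>
    intro l cur acc h
    cases l with
    | nil => simp [PySem.Chars.splitOn.go, sp1]
    | cons c rest =>
      rw [PySem.Chars.splitOn.go]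
      by_cases hc : c = '.'
      · subst hc
        have hpre : List.isPrefixOf ['.'] ('.' :: rest) = true := by simp [List.isPrefixOf]
        simp only [hpre, if_pos]
        rw [show List.drop (['.'].length) ('.' :: rest) = rest from rfl]
        rw [ih rest [] (List.reverse cur :: acc) (by simp at h ⊢; omega)]
        simp [sp1]
        cases sp1 rest <;> rfl
      · have hpre : List.isPrefixOf ['.'] (c :: rest) = false := by
          simp [List.isPrefixOf]; exact fun hcc => absurd hcc.symm hc
        simp only [hpre, Bool.false_eq_true, if_neg, not_false_iff]
        rw [ih rest (c :: cur) acc (by simp at h ⊢; omega)]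
        simp only [sp1, if_neg hc, List.modifyHead_modifyHead]
        have hf : ((fun x => List.reverse cur ++ x) ∘ fun x => c :: x)
            = (fun x => List.reverse (c :: cur) ++ x) := by
          funext x; simp
        rw [hf]

lemma go2_eq : ∀ (fuel : Nat) (l cur : List Char) (acc : List (List Char)),
    l.length < fuel →
    PySem.Chars.splitOn.go ['.', '.'] fuel l cur acc
      = acc.reverse ++ (sp2 l).modifyHead (cur.reverse ++ ·) := by
  intro fuel
  induction fuel with
  | zero => intro l cur acc h; omega
  | succ n ih =>
    intro l cur acc h
    cases l with
    | nil => simp [PySem.Chars.splitOn.go, sp2]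
    | cons c rest =>
      rw [PySem.Chars.splitOn.go]
      cases rest with
      | nil =>
        have hpre : List.isPrefixOf ['.', '.'] [c] = false := by simp [List.isPrefixOf]
        simp only [hpre, Bool.false_eq_true, if_neg, not_false_iff]
        rw [ih [] (c :: cur) acc (by simp at h ⊢; omega)]
        simp [sp2]
      | cons d m =>
        by_cases hcd : c = '.' ∧ d = '.'
        · obtain ⟨hc, hd⟩ := hcd
          subst hc; subst hd
          have hpre : List.isPrefixOf ['.', '.'] ('.' :: '.' :: m) = true := by
            simp [List.isPrefixOf]
          simp only [hpre, if_pos]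
          rw [show List.drop (List.length ['.', '.']) ('.' :: '.' :: m) = m by simp]
          rw [ih m [] (List.reverse cur :: acc) (by simp at h ⊢; omega)]
          simp [sp2]
          cases sp2 m <;> rfl
        · have hpre : List.isPrefixOf ['.', '.'] (c :: d :: m) = false := by
            simp [List.isPrefixOf]
            intro hc hd; exact hcd ⟨hc.symm, hd.symm⟩
          simp only [hpre, Bool.false_eq_true, if_neg, not_false_iff]
          rw [ih (d :: m) (c :: cur) acc (by simp at h ⊢; omega)]
          simp only [sp2, if_neg hcd, List.modifyHead_modifyHead]
          have hf : ((fun x => List.reverse cur ++ x) ∘ fun x => c :: x)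
              = (fun x => List.reverse (c :: cur) ++ x) := by
            funext x; simp
          rw [hf]

lemma splitOn_dot (l : List Char) : PySem.Chars.splitOn l ['.'] = sp1 l := by
  unfold PySem.Chars.splitOn
  rw [go1_eq (l.length + 1) l [] [] (by omega)]
  cases h : sp1 l with
  | nil => exact absurd h (sp1_ne_nil l)
  | cons a t => simp

lemma splitOn_dotdot (l : List Char) : PySem.Chars.splitOn l ['.', '.'] = sp2 l := by
  unfold PySem.Chars.splitOn
  rw [go2_eq (l.length + 1) l [] [] (by omega)]
  cases h : sp2 l with
  | nil => exact absurd h (sp2_ne_nil l)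
  | cons a t => simp

-- two rewriting helpers for the empty-token filter
lemma filter_eps (X : List (List Char)) :
    ([] :: X).filter (fun x => decide (x ≠ [])) = X.filter (fun x => decide (x ≠ [])) := by
  simp

lemma filter_cons_ne {a : List Char} (X : List (List Char)) (h : a ≠ []) :
    (a :: X).filter (fun x => decide (x ≠ [])) = a :: X.filter (fun x => decide (x ≠ [])) := by
  simp [h]

-- the crux: flattening the nested split equals the flat split, up to empty tokens
lemma main_aux : ∀ (n : Nat) (l : List Char), l.length ≤ n →
    ((sp2 l).flatMap sp1).head? = (sp1 l).head? ∧
    ((sp2 l).flatMap sp1).filter (fun x => decide (x ≠ []))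
      = (sp1 l).filter (fun x => decide (x ≠ [])) := by
  intro n
  induction n with
  | zero =>
    intro l h
    have : l = [] := List.eq_nil_of_length_eq_zero (Nat.le_zero.mp h)
    subst this
    simp [sp1, sp2]
  | succ n ih =>
    intro l h
    match l with
    | [] => simp [sp1, sp2]
    | [c] => simp [sp1, sp2]
    | c :: d :: m =>
      by_cases hcd : c = '.' ∧ d = '.'
      · obtain ⟨hc, hd⟩ := hcd
        have hm : m.length ≤ n := by simp at h; omega
        obtain ⟨ihh, ihf⟩ := ih m hm
        have e2 : sp2 (c :: d :: m) = [] :: sp2 m := by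
          simp only [sp2, if_pos (⟨hc, hd⟩ : c = '.' ∧ d = '.')]
        have e1 : sp1 (c :: d :: m) = [] :: [] :: sp1 m := by
          simp only [sp1, if_pos hc, if_pos hd]
        constructor
        · rw [e2, List.flatMap_cons, e1]
          rw [show sp1 [] = [[]] from rfl, List.singleton_append]
          simp
        · rw [e2, List.flatMap_cons, e1]
          rw [show sp1 [] = [[]] from rfl, List.singleton_append]
          rw [filter_eps, filter_eps, filter_eps, ihf]
      · have hdm : (d :: m).length ≤ n := by simp at h ⊢; omega
        obtain ⟨ihh, ihf⟩ := ih (d :: m) hdm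
        obtain ⟨h2, t2, hsp2⟩ := List.exists_cons_of_ne_nil (sp2_ne_nil (d :: m))
        have e2 : sp2 (c :: d :: m) = (c :: h2) :: t2 := by
          simp only [sp2, if_neg hcd, hsp2, List.modifyHead_cons]
        by_cases hc : c = '.'
        · have e1 : sp1 (c :: d :: m) = [] :: sp1 (d :: m) := by
            simp only [sp1, if_pos hc]
          have ef : sp1 (c :: h2) = [] :: sp1 h2 := by
            simp only [sp1, if_pos hc]
          constructor
          · rw [e2, List.flatMap_cons, ef, e1, List.cons_append]
            simp
          · rw [e2, List.flatMap_cons, ef, e1, List.cons_append, filter_eps, filter_eps]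
            rw [← List.flatMap_cons, ← hsp2, ihf]
        · obtain ⟨h1, t1, hsp1h⟩ := List.exists_cons_of_ne_nil (sp1_ne_nil h2)
          obtain ⟨g1, g1s, hsp1l⟩ := List.exists_cons_of_ne_nil (sp1_ne_nil (d :: m))
          have e1 : sp1 (c :: d :: m) = (c :: g1) :: g1s := by
            have e1' : sp1 (c :: d :: m)
                = if c = '.' then [] :: sp1 (d :: m)
                  else (sp1 (d :: m)).modifyHead (fun x => c :: x) := rfl
            rw [e1', if_neg hc, hsp1l, List.modifyHead_cons]
          have ef : sp1 (c :: h2) = (c :: h1) :: t1 := by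
            have ef' : sp1 (c :: h2)
                = if c = '.' then [] :: sp1 h2
                  else (sp1 h2).modifyHead (fun x => c :: x) := rfl
            rw [ef', if_neg hc, hsp1h, List.modifyHead_cons]
          simp only [hsp2, List.flatMap_cons, hsp1h, List.cons_append, hsp1l,
            List.head?_cons] at ihh ihf
          have hg : h1 = g1 := by simpa using ihh
          subst hg
          constructor
          · rw [e2, List.flatMap_cons, ef, List.cons_append, e1]
            simp
          · rw [e2, List.flatMap_cons, ef, List.cons_append, e1]
            rw [filter_cons_ne _ (by simp), filter_cons_ne _ (by simp)]
            have key : (t1 ++ t2.flatMap sp1).filter (fun x => decide (x ≠ []))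
                = g1s.filter (fun x => decide (x ≠ [])) := by
              by_cases h1e : h1 = []
              · subst h1e
                rw [filter_eps, filter_eps] at ihf
                exact ihf
              · rw [filter_cons_ne _ h1e, filter_cons_ne _ h1e] at ihf
                exact List.tail_eq_of_cons_eq ihf
            rw [key]

lemma nested_flat (p : List Char) :
    ((PySem.Chars.splitOn p ['.', '.']).flatMap (fun q => PySem.Chars.splitOn q ['.'])).filter
        (fun x => decide (x ≠ []))
      = (PySem.Chars.splitOn p ['.']).filter (fun x => decide (x ≠ [])) := by
  simp only [splitOn_dot, splitOn_dotdot]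
  exact (main_aux p.length p le_rfl).2

-- lifting to strings
lemma str_split_eq (s sep : String) (h : sep.toList ≠ []) :
    (PySem.Str.split? s sep).getD []
      = (PySem.Chars.splitOn s.toList sep.toList).map String.ofList := by
  have hm := PySem.Str.split?_map s sep
  cases hq : PySem.Str.split? s sep with
  | none =>
    rw [hq] at hm
    simp [PySem.Chars.split?, List.isEmpty_iff, h] at hm
  | some L =>
    rw [hq] at hm
    simp only [Option.map_some, PySem.Chars.split?, List.isEmpty_iff, if_neg h] at hm
    have hL : L.map String.toList = PySem.Chars.splitOn s.toList sep.toList := by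
      simpa using hm
    rw [Option.getD_some, ← hL, List.map_map]
    simp [Function.comp_def]

lemma filters_eq (p : List Char) :
    ((PySem.Chars.splitOn p ['.', '.']).flatMap (fun q => PySem.Chars.splitOn q ['.'])).filter
        (fun cs => decide ((PySem.Chars.split₀ cs).length < 8) && decide (cs ≠ []))
      = (PySem.Chars.splitOn p ['.']).filter
        (fun cs => decide (cs ≠ []) && decide ((PySem.Chars.split₀ cs).length < 8)) := by
  calc ((PySem.Chars.splitOn p ['.', '.']).flatMap (fun q => PySem.Chars.splitOn q ['.'])).filter
        (fun cs => decide ((PySem.Chars.split₀ cs).length < 8) && decide (cs ≠ []))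
      = (((PySem.Chars.splitOn p ['.', '.']).flatMap (fun q => PySem.Chars.splitOn q ['.'])).filter
          (fun cs => decide (cs ≠ []))).filter
          (fun cs => decide ((PySem.Chars.split₀ cs).length < 8)) := List.filter_filter.symm
    _ = ((PySem.Chars.splitOn p ['.']).filter (fun cs => decide (cs ≠ []))).filter
          (fun cs => decide ((PySem.Chars.split₀ cs).length < 8)) := by rw [nested_flat]
    _ = (PySem.Chars.splitOn p ['.']).filter
          (fun cs => decide ((PySem.Chars.split₀ cs).length < 8) && decide (cs ≠ [])) :=
        List.filter_filter
    _ = (PySem.Chars.splitOn p ['.']).filter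
          (fun cs => decide (cs ≠ []) && decide ((PySem.Chars.split₀ cs).length < 8)) :=
        List.filter_congr (fun a _ => Bool.and_comm _ _)

lemma split0_len (cs : List Char) :
    (PySem.Str.split₀ (String.ofList cs)).length = (PySem.Chars.split₀ cs).length := by
  have h := PySem.Str.split₀_map_toList (String.ofList cs)
  rw [String.toList_ofList] at h
  calc (PySem.Str.split₀ (String.ofList cs)).length
      = ((PySem.Str.split₀ (String.ofList cs)).map String.toList).length :=
        (List.length_map _).symm
    _ = (PySem.Chars.split₀ cs).length := by rw [h]

-- A's token condition, read on the character level
lemma condA_eq (cs : List Char) :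
    (decide ((PySem.Str.split₀ (String.ofList cs)).length < 8)
        && (PySem.Str.len (String.ofList cs) != 0))
      = (decide ((PySem.Chars.split₀ cs).length < 8) && decide (cs ≠ [])) := by
  have h2 : (PySem.Str.len (String.ofList cs) != 0) = decide (cs ≠ []) := by
    rw [PySem.Str.len_eq, String.toList_ofList]
    cases cs with
    | nil => simp
    | cons a t => simp; omega
  rw [split0_len, h2]

-- B's scanner, characterised: scanning l followed by the sentinel '.' emits exactly the
-- qualifying tokens of the flat split sp1 l (with `cur` prepended to the first token).
lemma scan_eq (dn : String) : ∀ (l cur : List Char) (out : List String),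
    ppilScan dn (l ++ ['.']) cur out
      = out ++ (((sp1 l).modifyHead (cur ++ ·)).filter
          (fun cs => decide (cs ≠ []) && decide ((PySem.Chars.split₀ cs).length < 8))).map
          (fun cs => dn ++ " can be prevented by " ++ String.ofList cs) := by
  intro l
  induction l with
  | nil =>
    intro cur out
    simp only [List.nil_append, ppilScan, sp1, List.modifyHead_cons, List.append_nil]
    by_cases h : cur ≠ [] ∧ (PySem.Chars.split₀ cur).length < 8
    · rw [if_pos h]
      simp [List.filter, h.1, h.2]
    · rw [if_neg h]
      rw [not_and_or] at h
      rcases h with h | h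
      · simp only [ne_eq, not_not] at h
        simp [List.filter, h]
      · simp [List.filter, h]
  | cons c rest ih =>
    intro cur out
    by_cases hc : c = '.'
    · subst hc
      rw [List.cons_append, show ppilScan dn ('.' :: (rest ++ ['.'])) cur out
          = ppilScan dn (rest ++ ['.']) []
              (if cur ≠ [] ∧ (PySem.Chars.split₀ cur).length < 8 then
                out ++ [dn ++ " can be prevented by " ++ String.ofList cur] else out)
          from by simp [ppilScan]]
      rw [ih]
      have e1 : sp1 ('.' :: rest) = [] :: sp1 rest := by simp [sp1]
      rw [e1, List.modifyHead_cons]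
      have hid : (sp1 rest).modifyHead (fun x => ([] : List Char) ++ x) = sp1 rest := by
        cases sp1 rest <;> rfl
      rw [hid, List.append_nil]
      by_cases h : cur ≠ [] ∧ (PySem.Chars.split₀ cur).length < 8
      · rw [if_pos h, List.filter_cons]
        simp [h.1, h.2]
      · rw [if_neg h, List.filter_cons]
        rw [not_and_or] at h
        rcases h with h | h
        · simp only [ne_eq, not_not] at h
          simp [h]
        · simp [h]
    · rw [List.cons_append, show ppilScan dn (c :: (rest ++ ['.'])) cur out
          = ppilScan dn (rest ++ ['.']) (cur ++ [c]) out from by simp [ppilScan, hc]]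
      rw [ih]
      have e1 : sp1 (c :: rest) = (sp1 rest).modifyHead (c :: ·) := by
        simp only [sp1, if_neg hc]
      rw [e1, List.modifyHead_modifyHead]
      have hf : ((fun x => cur ++ x) ∘ fun x => c :: x) = (fun x => (cur ++ [c]) ++ x) := by
        funext x; simp
      rw [hf]

-- ===== VERDICT (by name: the statement is the Claim_ definition above) =====
theorem process_prev_il_spec : Claim_equal_process_prev_il := by
  intro rows _ hpre
  obtain ⟨hp, -⟩ := hpre
  unfold Spec_process_prev_il process_prev_il process_prev_il_alt
  cases hq : PySem.Dict.get? (PySem.Dict.mk rows) "pre_il" with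
  | none => rfl
  | some pre =>
    dsimp only
    have e2 : (PySem.Str.split? pre "..").getD []
        = (PySem.Chars.splitOn pre.toList ['.', '.']).map String.ofList := by
      have h := str_split_eq pre ".." (by decide)
      rw [show (".." : String).toList = ['.', '.'] from rfl] at h
      exact h
    have e1s : ∀ s : String, (PySem.Str.split? s ".").getD []
        = (PySem.Chars.splitOn s.toList ['.']).map String.ofList := by
      intro s
      have h := str_split_eq s "." (by decide)
      rw [show ("." : String).toList = ['.'] from rfl] at h
      exact h
    rw [scan_eq]
    have hid : (sp1 pre.toList).modifyHead (([] : List Char) ++ ·) = sp1 pre.toList := by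
      cases sp1 pre.toList <;> rfl
    rw [hid, List.nil_append, ← splitOn_dot]
    simp only [PySem.List.foldl_append_if, PySem.List.foldl_append_eq_flatMap,
      List.nil_append, e2, e1s, List.flatMap_map, String.toList_ofList,
      List.filter_map, List.map_map]
    rw [← List.map_flatMap, ← List.filter_flatMap]
    rw [List.filter_congr (fun a _ => by
      simpa [Function.comp_def] using condA_eq a)]
    have hA : (fun a : List Char => decide ((PySem.Chars.split₀ a).length < 8) && !decide (a = []))
        = (fun cs : List Char => decide ((PySem.Chars.split₀ cs).length < 8) && decide (cs ≠ [])) := by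
      funext a; simp only [ne_eq, decide_not]
    rw [hA, filters_eq]
    simp [Function.comp_def]
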